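-- pv_equiv track=rewrite | github.com/LeoVogiatzis/Top-k-Most-Probable-Triangles-in-Uncertain-Graphs | partition_based_triangles.py | my_mapper
-- ===== SOURCE A (Python) =====
-- def my_mapper(edge):
--     """
--     Partitioning the graphs into sub_graphs using python processes
--     :param edge: instance of edgelist
--     :return: the output are nodes that will be served to reducers for parallel purposes
--     """
--     processes = 4
--     # ftiaxnoume ena ena key px '0 1 3' kai se ayto to key dinoume ena
--     node_1 = int(edge[0]) % processes
--     node_2 = int(edge[1]) % processes
--     output = []
--
--     for a in range(0, processes):
--         for b in range(a + 1, processes):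
--             for c in range(b + 1, processes):
--                 if {node_1, node_2}.issubset({a, b, c}):
--                     # for example ('0 1 3', [(3, 5)])
--                     (output.append((str(a) + " " + str(b) + " " + str(c), tuple([(edge[0], edge[1], edge[2])]))))
--     return output
-- ===== SOURCE B (Python) =====
-- def _combos(xs, k):
--     if k == 0:
--         return [()]
--     if not xs:
--         return []
--     head, tail = xs[0], xs[1:]
--     return [(head,) + rest for rest in _combos(tail, k - 1)] + _combos(tail, k)
--
--
-- def my_mapper(edge):
--     processes = 4
--     required = {int(edge[0]) % processes, int(edge[1]) % processes}
--     others = [x for x in range(processes) if x not in required]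
--     payload = ((edge[0], edge[1], edge[2]),)
--     return [(" ".join(str(t) for t in sorted(required | set(combo))), payload)
--             for combo in _combos(others, 3 - len(required))]
-- ===== Notes on version B (the rewrite author's own statement) =====
-- stated objective: alternative
-- what changed: Instead of scanning all C(4,3) triples with a triple-nested loop and a subset test, B computes the required residues' complement and directly enumerates combinations of the missing nodes, constructing exactly the matching triples in the same order.
import Mathlib
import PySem

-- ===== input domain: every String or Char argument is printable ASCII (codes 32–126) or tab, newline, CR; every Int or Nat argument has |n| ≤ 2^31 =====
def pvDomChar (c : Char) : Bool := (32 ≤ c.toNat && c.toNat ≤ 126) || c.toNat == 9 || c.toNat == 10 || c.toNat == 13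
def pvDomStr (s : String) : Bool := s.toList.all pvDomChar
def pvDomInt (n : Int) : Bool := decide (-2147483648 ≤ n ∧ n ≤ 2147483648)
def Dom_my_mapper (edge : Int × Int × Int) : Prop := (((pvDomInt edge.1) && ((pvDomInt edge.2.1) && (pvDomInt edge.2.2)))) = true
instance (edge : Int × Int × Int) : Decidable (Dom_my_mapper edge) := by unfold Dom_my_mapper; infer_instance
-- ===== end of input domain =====

-- B enumerates combinations of the non-required residues directly instead of filtering all triples; same output, alternative decomposition.
-- ===== PORT A =====
def my_mapper (edge : Int × Int × Int) : List (String × (List (Int × Int × Int))) :=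
  let processes : Int := 4
  let node_1 := PySem.Int.mod edge.1 processes
  let node_2 := PySem.Int.mod edge.2.1 processes
  (PySem.List.pyRange 0 processes 1).foldl (fun output a =>
    (PySem.List.pyRange (a + 1) processes 1).foldl (fun output b =>
      (PySem.List.pyRange (b + 1) processes 1).foldl (fun output c =>
        if PySem.Set.issubset (PySem.Set.ofList [node_1, node_2]) (PySem.Set.ofList [a, b, c]) then
          output ++ [(String.ofList (PySem.Int.toChars a ++ [' '] ++ PySem.Int.toChars b ++ [' '] ++ PySem.Int.toChars c),
                      [(edge.1, edge.2.1, edge.2.2)])]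
        else output) output) output) []

-- ===== PORT B =====
-- B-side helper: _combos(xs, k) — combinations of xs of size k, structural recursion on xs
def pvCombos (xs : List Int) (k : Int) : List (List Int) :=
  if k = 0 then [[]]
  else match xs with
    | [] => []
    | head :: tail => (pvCombos tail (k - 1)).map (fun rest => head :: rest) ++ pvCombos tail k

def my_mapper_alt (edge : Int × Int × Int) : List (String × (List (Int × Int × Int))) :=
  let processes : Int := 4
  let required : PySem.Set Int := PySem.Set.ofList [PySem.Int.mod edge.1 processes, PySem.Int.mod edge.2.1 processes]
  let others := (PySem.List.pyRange 0 processes 1).filter (fun x => !(PySem.Set.contains required x))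
  let payload := [(edge.1, edge.2.1, edge.2.2)]
  (pvCombos others (3 - PySem.Set.len required)).map (fun combo =>
    (String.ofList (PySem.Chars.join [' ']
        ((PySem.List.sorted (PySem.Set.union required combo) (fun t => t) false).map PySem.Int.toChars)),
     payload))

-- ===== PRECONDITION & SPEC =====
def Spec_my_mapper (edge : Int × Int × Int) (out : List (String × (List (Int × Int × Int)))) : Prop := out = my_mapper_alt edge
instance (edge : Int × Int × Int) (out : List (String × (List (Int × Int × Int)))) : Decidable (Spec_my_mapper edge out) := by unfold Spec_my_mapper; infer_instance

-- ===== CLAIM (what is proved, stated in full; the proofs are below) =====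
def Claim_equal_my_mapper : Prop := ∀ (edge : Int × Int × Int), Dom_my_mapper edge → Spec_my_mapper edge (my_mapper edge)

-- ===== LEMMAS AND PROOFS =====

-- ===== VERDICT (by name: the statement is the Claim_ definition above) =====
-- proof-side helpers: the two port bodies abstracted over the residues and the payload
def pvA (n1 n2 : Int) (p : List (Int × Int × Int)) : List (String × (List (Int × Int × Int))) :=
  (PySem.List.pyRange 0 4 1).foldl (fun output a =>
    (PySem.List.pyRange (a + 1) 4 1).foldl (fun output b =>
      (PySem.List.pyRange (b + 1) 4 1).foldl (fun output c =>
        if PySem.Set.issubset (PySem.Set.ofList [n1, n2]) (PySem.Set.ofList [a, b, c]) then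
          output ++ [(String.ofList (PySem.Int.toChars a ++ [' '] ++ PySem.Int.toChars b ++ [' '] ++ PySem.Int.toChars c), p)]
        else output) output) output) []

def pvB (n1 n2 : Int) (p : List (Int × Int × Int)) : List (String × (List (Int × Int × Int))) :=
  let required : PySem.Set Int := PySem.Set.ofList [n1, n2]
  (pvCombos ((PySem.List.pyRange 0 4 1).filter (fun x => !(PySem.Set.contains required x)))
      (3 - PySem.Set.len required)).map (fun combo =>
    (String.ofList (PySem.Chars.join [' ']
        ((PySem.List.sorted (PySem.Set.union required combo) (fun t => t) false).map PySem.Int.toChars)), p))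

theorem my_mapper_eq_pvA (e : Int × Int × Int) :
    my_mapper e = pvA (PySem.Int.mod e.1 4) (PySem.Int.mod e.2.1 4) [(e.1, e.2.1, e.2.2)] := rfl

theorem my_mapper_alt_eq_pvB (e : Int × Int × Int) :
    my_mapper_alt e = pvB (PySem.Int.mod e.1 4) (PySem.Int.mod e.2.1 4) [(e.1, e.2.1, e.2.2)] := rfl

theorem pvA_eq_pvB (n1 n2 : Int) (hl1 : 0 ≤ n1) (hr1 : n1 < 4) (hl2 : 0 ≤ n2) (hr2 : n2 < 4)
    (p : List (Int × Int × Int)) : pvA n1 n2 p = pvB n1 n2 p := by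
  interval_cases n1 <;> interval_cases n2 <;> rfl

theorem my_mapper_spec : Claim_equal_my_mapper := by
  intro edge _
  unfold Spec_my_mapper
  rw [my_mapper_eq_pvA, my_mapper_alt_eq_pvB]
  exact pvA_eq_pvB _ _ (PySem.Int.mod_nonneg edge.1 (by norm_num))
    (PySem.Int.mod_lt edge.1 (by norm_num)) (PySem.Int.mod_nonneg edge.2.1 (by norm_num))
    (PySem.Int.mod_lt edge.2.1 (by norm_num)) _
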